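-- pv_equiv track=rewrite | github.com/Arsen1302/Code-copy-detector | TestData/solutions/problem_1576_5.py | solution_1576_5
-- ===== SOURCE A (Python) =====
-- def solution_1576_5(num: str) -> bool:
--     leng = len(num)
--     freq = {}
--
--     for i in range(leng):
--         freq[str(i)] = 0
--
--     for i in range(leng):
--         if num[i] in freq:
--             freq[num[i]] += 1
--
--     for i in range(leng):
--         if num[i] == str(freq[str(i)]):
--             continue
--         else:
--             return False
--
--     return True
-- ===== SOURCE B (Python) =====
-- def solution_1576_5(num: str) -> bool:
--     # num is self-describing iff the character at position i equals the
--     # count (as a string) of occurrences of the digit str(i) in num.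
--     return all(ch == str(sum(c == str(i) for c in num))
--                for i, ch in enumerate(num))
-- ===== Notes on version B (the rewrite author's own statement) =====
-- stated objective: simpler
-- what changed: B drops A's three passes and the frequency dict entirely: one pass over enumerate(num) checks each character directly against the count of its digit computed by an inline scan.
import Mathlib
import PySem

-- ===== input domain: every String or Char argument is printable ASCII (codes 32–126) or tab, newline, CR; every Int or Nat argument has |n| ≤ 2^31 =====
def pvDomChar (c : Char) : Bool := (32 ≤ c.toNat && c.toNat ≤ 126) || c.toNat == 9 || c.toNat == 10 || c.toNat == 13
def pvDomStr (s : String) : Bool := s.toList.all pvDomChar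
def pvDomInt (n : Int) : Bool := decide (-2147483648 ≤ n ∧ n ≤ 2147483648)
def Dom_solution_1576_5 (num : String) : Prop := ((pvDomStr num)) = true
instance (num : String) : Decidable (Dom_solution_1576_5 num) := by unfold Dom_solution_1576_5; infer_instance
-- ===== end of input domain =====

-- B replaces A's three loops and frequency dict by one pass that checks each
-- position directly against the count of its digit (objective: simpler).

-- ===== PORT A =====
-- third loop of A, with its early 'return False' (num[i]/freq[str(i)] always in range/present here)
def pvCheckA (num : List Char) (freq : PySem.Dict String Int) : List Int → Bool
  | [] => true
  | i :: rest =>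
    if String.ofList [PySem.List.pyGetD num i ' '] == PySem.Int.toStr (freq.getD (PySem.Int.toStr i) 0)
    then pvCheckA num freq rest
    else false

def solution_1576_5 (num : String) : Bool :=
  let leng : Int := PySem.Str.len num
  let freq : PySem.Dict String Int :=
    (PySem.List.pyRange 0 leng).foldl
      (fun d i => d.insert (PySem.Int.toStr i) 0) PySem.Dict.empty
  let freq :=
    (PySem.List.pyRange 0 leng).foldl
      (fun d i =>
        if d.contains (String.ofList [PySem.List.pyGetD num.toList i ' ']) then
          d.insert (String.ofList [PySem.List.pyGetD num.toList i ' '])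
            (d.getD (String.ofList [PySem.List.pyGetD num.toList i ' ']) 0 + 1)
        else d)
      freq
  pvCheckA num.toList freq (PySem.List.pyRange 0 leng)

-- ===== PORT B =====
def solution_1576_5_alt (num : String) : Bool :=
  (PySem.List.enumerate num.toList 0).all (fun p =>
    String.ofList [p.2] ==
      PySem.Int.toStr
        ((num.toList.map
            (fun c => if String.ofList [c] == PySem.Int.toStr p.1 then (1 : Int) else 0)).sum))

-- ===== PRECONDITION & SPEC =====
def Spec_solution_1576_5 (num : String) (out : Bool) : Prop := out = solution_1576_5_alt num
instance (num : String) (out : Bool) : Decidable (Spec_solution_1576_5 num out) := by unfold Spec_solution_1576_5; infer_instance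

-- ===== CLAIM (what is proved, stated in full; the proofs are below) =====
def Claim_equal_solution_1576_5 : Prop := ∀ (num : String), Dom_solution_1576_5 num → Spec_solution_1576_5 num (solution_1576_5 num)

-- ===== LEMMAS AND PROOFS =====

-- A's first loop: every stored value is 0, so getD _ 0 stays 0 at every key
theorem pvGetD_zeros (l : List Int) (d : PySem.Dict String Int)
    (hd : ∀ k, d.getD k 0 = 0) (k : String) :
    ((l.foldl (fun d i => d.insert (PySem.Int.toStr i) 0) d).getD k 0) = 0 := by
  induction l generalizing d with
  | nil => exact hd k
  | cons a l ih =>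
    refine ih _ (fun k' => ?_)
    rw [PySem.Dict.getD_insert]
    split <;> simp [hd]

-- A's first loop: the resulting key set
theorem pvContains_zeros (l : List Int) (d : PySem.Dict String Int) (k : String) :
    ((l.foldl (fun d i => d.insert (PySem.Int.toStr i) 0) d).contains k) =
      (d.contains k || l.any (fun i => PySem.Int.toStr i == k)) := by
  induction l generalizing d with
  | nil => simp
  | cons a l ih =>
    simp only [List.foldl_cons, List.any_cons, ih, PySem.Dict.contains_insert]
    rw [show (k == PySem.Int.toStr a) = (PySem.Int.toStr a == k) from by
      simp [Bool.beq_comm]]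
    cases PySem.Int.toStr a == k <;> simp

-- A's second loop counts occurrences at each pre-existing key
theorem pvGetD_count (l : List Char) (d : PySem.Dict String Int) (k : String) :
    ((l.foldl (fun d c =>
        if d.contains (String.ofList [c]) then
          d.insert (String.ofList [c]) (d.getD (String.ofList [c]) 0 + 1)
        else d) d).getD k 0) =
      d.getD k 0 +
        (if d.contains k then (l.countP (fun c => String.ofList [c] == k) : Int) else 0) := by
  induction l generalizing d with
  | nil => simp
  | cons a l ih =>
    simp only [List.foldl_cons, List.countP_cons]
    by_cases hc : (d.contains (String.ofList [a])) = true
    · simp only [hc, if_true]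
      rw [ih, PySem.Dict.getD_insert, PySem.Dict.contains_insert]
      by_cases hk : k = String.ofList [a]
      · subst hk
        simp [hc]
        ring
      · have h1 : (String.ofList [a] == k) = false := by
          simpa [Bool.beq_comm] using beq_eq_false_iff_ne.mpr hk
        simp [hk, h1]
    · have hc' : (d.contains (String.ofList [a])) = false := by
        simpa using hc
      simp only [hc']
      rw [ih]
      by_cases hk : k = String.ofList [a]
      · subst hk; simp [hc']
      · have h1 : (String.ofList [a] == k) = false := by
          simpa [Bool.beq_comm] using beq_eq_false_iff_ne.mpr hk
        simp [h1]

-- A's third loop with early return is an 'all'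
theorem pvCheckA_eq_all (num : List Char) (freq : PySem.Dict String Int) (l : List Int) :
    pvCheckA num freq l =
      l.all (fun i =>
        String.ofList [PySem.List.pyGetD num i ' '] ==
          PySem.Int.toStr (freq.getD (PySem.Int.toStr i) 0)) := by
  induction l with
  | nil => rfl
  | cons a l ih =>
    simp only [pvCheckA, List.all_cons]
    split
    · rename_i h; rw [h, ih]; simp
    · rename_i h
      rw [Bool.eq_false_iff.mpr h]
      simp

-- value of A's frequency dict at key str(i), for i produced by range(len(num))
theorem pvFreqVal (cs : List Char) (i : Int)
    (hmem : i ∈ PySem.List.pyRange 0 (cs.length : Int)) :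
    ((cs.foldl
        (fun d c =>
          if d.contains (String.ofList [c]) then
            d.insert (String.ofList [c]) (d.getD (String.ofList [c]) 0 + 1)
          else d)
        ((PySem.List.pyRange 0 (cs.length : Int)).foldl
          (fun (d : PySem.Dict String Int) i => d.insert (PySem.Int.toStr i) 0)
          PySem.Dict.empty)).getD (PySem.Int.toStr i) 0)
    = (cs.countP (fun c => String.ofList [c] == PySem.Int.toStr i) : Int) := by
  rw [pvGetD_count, pvContains_zeros, pvGetD_zeros _ _ (fun k => by simp)]
  have hany : ((PySem.List.pyRange 0 (cs.length : Int)).any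
      (fun j => PySem.Int.toStr j == PySem.Int.toStr i)) = true :=
    List.any_eq_true.mpr ⟨i, hmem, by simp⟩
  simp [hany]

-- ===== VERDICT (by name: the statement is the Claim_ definition above) =====
theorem solution_1576_5_spec : Claim_equal_solution_1576_5 := by
  intro num _
  unfold Spec_solution_1576_5 solution_1576_5 solution_1576_5_alt
  simp only [PySem.Str.len_eq]
  have hfold := PySem.List.foldl_pyRange_zero_pyGetD' num.toList ' '
      (fun (d : PySem.Dict String Int) c =>
        if d.contains (String.ofList [c]) then
          d.insert (String.ofList [c]) (d.getD (String.ofList [c]) 0 + 1)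
        else d)
      ((PySem.List.pyRange 0 (num.toList.length : Int)).foldl
        (fun d i => d.insert (PySem.Int.toStr i) 0) PySem.Dict.empty)
  rw [hfold, pvCheckA_eq_all]
  rw [Bool.eq_iff_iff, List.all_eq_true, List.all_eq_true]
  constructor
  · intro h p hp
    rw [PySem.List.mem_enumerate_iff] at hp
    obtain ⟨k, hk, rfl⟩ := hp
    have hmem : ((0 : Int) + (k : Int)) ∈ PySem.List.pyRange 0 (num.toList.length : Int) := by
      rw [PySem.List.mem_pyRange_one]; omega
    have h' := h _ hmem
    rw [pvFreqVal _ _ hmem] at h'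
    rw [PySem.List.pyGetD_eq_getElem num.toList ' ' (by omega) (by omega)] at h'
    simp only [zero_add, Int.toNat_natCast] at h' ⊢
    rw [PySem.List.sum_map_ite_one_zero (fun c => String.ofList [c] == PySem.Int.toStr (k : Int))]
    exact h'
  · intro h i hmem
    have hi := PySem.List.mem_pyRange_one.mp hmem
    have hp : ((i : Int), num.toList[i.toNat]'(by omega)) ∈ PySem.List.enumerate num.toList 0 := by
      rw [PySem.List.mem_enumerate_iff]
      exact ⟨i.toNat, by omega, by simp; omega⟩
    have h' := h _ hp
    rw [PySem.List.sum_map_ite_one_zero (fun c => String.ofList [c] == PySem.Int.toStr i)] at h'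
    rw [pvFreqVal _ _ hmem]
    rw [PySem.List.pyGetD_eq_getElem num.toList ' ' (by omega) (by omega)]
    exact h'
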